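-- pv_equiv track=rewrite | github.com/hboonewilson/1CS | Discussion/ds3.py | hasFourConsecVowels
-- ===== SOURCE A (Python) =====
-- def checkVowel(word, index, origin):
--     return (word[origin+index] == 'a' or word[origin+index] == 'e' or word[origin+index] == 'i' or word[origin+index] == 'o' or word[origin+index] == 'u')
--
-- def hasFourConsecVowels(word):
--     result = False
--     x = 0
--     while x + 3 < len(word):
--         if checkVowel(word, 0, x) and checkVowel(word, 1, x) and checkVowel(word, 2, x) and checkVowel(word, 3, x):
--             result = True
--             break
--         x += 1
--     return result
-- ===== SOURCE B (Python) =====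
-- def hasFourConsecVowels(word):
--     count = 0
--     for ch in word:
--         if ch in ('a', 'e', 'i', 'o', 'u'):
--             count += 1
--             if count == 4:
--                 return True
--         else:
--             count = 0
--     return False
-- ===== Notes on version B (the rewrite author's own statement) =====
-- stated objective: simpler
-- what changed: Replaces the sliding 4-offset window re-check (four indexed vowel tests per position) with a single forward scan keeping a run-length counter that returns True when it reaches 4.
import Mathlib
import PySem

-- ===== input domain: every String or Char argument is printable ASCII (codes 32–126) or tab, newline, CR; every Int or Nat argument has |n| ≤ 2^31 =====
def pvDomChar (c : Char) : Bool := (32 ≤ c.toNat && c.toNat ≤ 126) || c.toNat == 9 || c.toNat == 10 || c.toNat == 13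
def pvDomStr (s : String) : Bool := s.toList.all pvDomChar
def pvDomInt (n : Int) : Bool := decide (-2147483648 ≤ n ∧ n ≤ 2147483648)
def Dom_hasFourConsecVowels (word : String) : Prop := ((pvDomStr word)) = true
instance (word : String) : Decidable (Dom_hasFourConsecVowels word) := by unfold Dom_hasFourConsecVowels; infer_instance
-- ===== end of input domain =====

-- B replaces A's four fixed-offset vowel tests per window position by a single scan with a
-- run-length counter (objective: simpler); same return value on every input.

-- ===== PORT A =====
-- checkVowel(word, index, origin): word[origin+index] compared against the five vowels.
-- Inside A's loop origin+index is always in range, so getD's default is never consulted.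
def checkVowel (cs : List Char) (index origin : Nat) : Bool :=
  cs.getD (origin + index) ' ' == 'a' || cs.getD (origin + index) ' ' == 'e' ||
  cs.getD (origin + index) ' ' == 'i' || cs.getD (origin + index) ' ' == 'o' ||
  cs.getD (origin + index) ' ' == 'u'

-- the while loop: x advances while x+3 < len(word); break-with-result-True returns true.
def hfcvLoop (cs : List Char) (x : Nat) : Bool :=
  if x + 3 < cs.length then
    if checkVowel cs 0 x && checkVowel cs 1 x && checkVowel cs 2 x && checkVowel cs 3 x then
      true
    else
      hfcvLoop cs (x + 1)
  else
    false
termination_by cs.length - x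

def hasFourConsecVowels (word : String) : Bool := hfcvLoop word.toList 0

-- ===== PORT B =====
def isVowelB (c : Char) : Bool := c == 'a' || c == 'e' || c == 'i' || c == 'o' || c == 'u'

-- the for loop with the run-length counter; early return on count == 4.
def hfcvScan : List Char → Nat → Bool
  | [], _ => false
  | c :: rest, count =>
    if isVowelB c then
      if count + 1 == 4 then true else hfcvScan rest (count + 1)
    else
      hfcvScan rest 0

def hasFourConsecVowels_alt (word : String) : Bool := hfcvScan word.toList 0

-- ===== PRECONDITION & SPEC =====
def Spec_hasFourConsecVowels (word : String) (out : Bool) : Prop := out = hasFourConsecVowels_alt word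
instance (word : String) (out : Bool) : Decidable (Spec_hasFourConsecVowels word out) := by unfold Spec_hasFourConsecVowels; infer_instance

-- ===== CLAIM (what is proved, stated in full; the proofs are below) =====
def Claim_equal_hasFourConsecVowels : Prop := ∀ (word : String), Dom_hasFourConsecVowels word → Spec_hasFourConsecVowels word (hasFourConsecVowels word)

-- ===== LEMMAS AND PROOFS =====

-- proof-only helper: A's loop rewritten as structural recursion on the suffix
def aSlide : List Char → Bool
  | c0 :: c1 :: c2 :: c3 :: rest =>
    if isVowelB c0 && isVowelB c1 && isVowelB c2 && isVowelB c3 then true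
    else aSlide (c1 :: c2 :: c3 :: rest)
  | _ => false

-- proof-only helper: the first k characters exist and are all vowels
def vpre : Nat → List Char → Bool
  | 0, _ => true
  | _ + 1, [] => false
  | k + 1, c :: cs => isVowelB c && vpre k cs

lemma checkVowel_cons (c : Char) (cs : List Char) (i x : Nat) :
    checkVowel (c :: cs) i (x + 1) = checkVowel cs i x := by
  simp [checkVowel, Nat.succ_add, List.getD]

lemma hfcvLoop_shift (c : Char) (cs : List Char) (x : Nat) :
    hfcvLoop (c :: cs) (x + 1) = hfcvLoop cs x := by
  induction hn : cs.length - x using Nat.strong_induction_on generalizing x with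
  | _ n ih =>
    conv_lhs => rw [hfcvLoop]
    conv_rhs => rw [hfcvLoop]
    by_cases h : x + 3 < cs.length
    · rw [if_pos (by simp; omega : x + 1 + 3 < (c :: cs).length), if_pos h,
        checkVowel_cons, checkVowel_cons, checkVowel_cons, checkVowel_cons]
      by_cases hc : (checkVowel cs 0 x && checkVowel cs 1 x && checkVowel cs 2 x &&
          checkVowel cs 3 x) = true
      · rw [if_pos hc, if_pos hc]
      · rw [if_neg hc, if_neg hc]
        exact ih (cs.length - (x + 1)) (by omega) (x + 1) rfl
    · rw [if_neg (by simp only [List.length_cons]; omega : ¬ x + 1 + 3 < (c :: cs).length), if_neg h]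

lemma hfcvLoop_eq_aSlide (cs : List Char) : hfcvLoop cs 0 = aSlide cs := by
  induction cs with
  | nil => rw [hfcvLoop]; simp [aSlide]
  | cons c0 tl ih =>
    match tl with
    | [] => rw [hfcvLoop]; simp [aSlide]
    | [c1] => rw [hfcvLoop]; simp [aSlide]
    | [c1, c2] => rw [hfcvLoop]; simp [aSlide]
    | c1 :: c2 :: c3 :: rest =>
      rw [hfcvLoop, aSlide]
      rw [if_pos (by simp only [List.length_cons]; omega : 0 + 3 < (c0 :: c1 :: c2 :: c3 :: rest).length)]
      rw [show checkVowel (c0 :: c1 :: c2 :: c3 :: rest) 0 0 = isVowelB c0 from rfl,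
          show checkVowel (c0 :: c1 :: c2 :: c3 :: rest) 1 0 = isVowelB c1 from rfl,
          show checkVowel (c0 :: c1 :: c2 :: c3 :: rest) 2 0 = isVowelB c2 from rfl,
          show checkVowel (c0 :: c1 :: c2 :: c3 :: rest) 3 0 = isVowelB c3 from rfl]
      by_cases hc : (isVowelB c0 && isVowelB c1 && isVowelB c2 && isVowelB c3) = true
      · rw [if_pos hc, if_pos hc]
      · rw [if_neg hc, if_neg hc,
          show (1 : Nat) = 0 + 1 from rfl, hfcvLoop_shift]
        exact ih

lemma vpre_mono {m m' : Nat} (h : m' ≤ m) (cs : List Char) (hv : vpre m cs = true) :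
    vpre m' cs = true := by
  induction cs generalizing m m' with
  | nil =>
    cases m' with
    | zero => rfl
    | succ k => cases m with
      | zero => omega
      | succ j => simp [vpre] at hv
  | cons c tl ih =>
    cases m' with
    | zero => rfl
    | succ k =>
      cases m with
      | zero => omega
      | succ j =>
        rw [vpre] at hv ⊢
        simp only [Bool.and_eq_true] at hv ⊢
        exact ⟨hv.1, ih (by omega) hv.2⟩

lemma vpre_four_aSlide (cs : List Char) (hv : vpre 4 cs = true) : aSlide cs = true := by
  match cs with
  | [] => simp [vpre] at hv
  | [c0] => simp [vpre] at hv
  | [c0, c1] => simp [vpre] at hv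
  | [c0, c1, c2] => simp [vpre] at hv
  | c0 :: c1 :: c2 :: c3 :: rest =>
    rw [aSlide]
    simp only [vpre, Bool.and_eq_true, Bool.and_true] at hv
    rw [if_pos (by simp [hv.1, hv.2.1, hv.2.2.1, hv.2.2.2])]

lemma aSlide_cons_not_vowel (c : Char) (tl : List Char) (hv : isVowelB c = false) :
    aSlide (c :: tl) = aSlide tl := by
  match tl with
  | [] => simp [aSlide]
  | [c1] => simp [aSlide]
  | [c1, c2] => simp [aSlide]
  | c1 :: c2 :: c3 :: rest =>
    rw [show aSlide (c :: c1 :: c2 :: c3 :: rest) =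
      (if isVowelB c && isVowelB c1 && isVowelB c2 && isVowelB c3 then true
       else aSlide (c1 :: c2 :: c3 :: rest)) from rfl]
    simp [hv]

lemma hfcvScan_invariant (cs : List Char) : ∀ k : Nat, k ≤ 3 →
    hfcvScan cs k = (vpre (4 - k) cs || aSlide cs) := by
  induction cs with
  | nil =>
    intro k hk
    rw [hfcvScan.eq_def]
    obtain ⟨m, hm⟩ : ∃ m, 4 - k = m + 1 := ⟨3 - k, by omega⟩
    simp [hm, vpre, aSlide]
  | cons c tl ih =>
    intro k hk
    rw [hfcvScan]
    by_cases hv : isVowelB c = true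
    · rw [if_pos hv]
      by_cases h4 : k = 3
      · subst h4
        rw [if_pos (by decide : ((3 : Nat) + 1 == 4) = true)]
        rw [show (4 : Nat) - 3 = 0 + 1 from rfl, vpre]
        simp [hv, vpre]
      · rw [if_neg (by simp; omega), ih (k + 1) (by omega)]
        rw [show (4 : Nat) - k = (4 - (k + 1)) + 1 by omega, vpre]
        simp only [hv, Bool.true_and]
        match tl with
        | [] => simp [aSlide]
        | [c1] => simp [aSlide]
        | [c1, c2] => simp [aSlide]
        | c1 :: c2 :: c3 :: rest =>
          rw [show aSlide (c :: c1 :: c2 :: c3 :: rest) =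
            (if isVowelB c && isVowelB c1 && isVowelB c2 && isVowelB c3 then true
             else aSlide (c1 :: c2 :: c3 :: rest)) from rfl]
          by_cases hall : (isVowelB c1 && isVowelB c2 && isVowelB c3) = true
          · -- a full window starts at c; both sides are true
            rw [if_pos (by simp [hv, hall])]
            have hp3 : vpre 3 (c1 :: c2 :: c3 :: rest) = true := by
              simp only [Bool.and_eq_true] at hall
              simp [vpre, hall.1.1, hall.1.2, hall.2]
            have h1 : vpre (4 - (k + 1)) (c1 :: c2 :: c3 :: rest) = true :=
              vpre_mono (by omega) _ hp3
            rw [h1]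
            simp
          · rw [if_neg (by simp only [hv, Bool.true_and]; exact hall)]
    · rw [if_neg hv, ih 0 (by omega)]
      have hvf : isVowelB c = false := by simp [Bool.not_eq_true] at hv; exact hv
      have h0 : vpre (4 - k) (c :: tl) = false := by
        obtain ⟨m, hm⟩ : ∃ m, 4 - k = m + 1 := ⟨3 - k, by omega⟩
        simp [hm, vpre, hvf]
      rw [h0, Bool.false_or, aSlide_cons_not_vowel c tl hvf]
      cases hvp : vpre 4 tl with
      | false => simp
      | true => simp [vpre_four_aSlide tl hvp]

-- ===== VERDICT (by name: the statement is the Claim_ definition above) =====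
theorem hasFourConsecVowels_spec : Claim_equal_hasFourConsecVowels := by
  intro word _
  unfold Spec_hasFourConsecVowels hasFourConsecVowels hasFourConsecVowels_alt
  rw [hfcvScan_invariant word.toList 0 (by omega), hfcvLoop_eq_aSlide]
  cases hvp : vpre 4 word.toList with
  | false => simp
  | true => simp [vpre_four_aSlide _ hvp]
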